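-- pv_equiv track=rewrite | github.com/drorFruchter/Intro2CS-Course | ex5/wordsearch.py | handle_direction_d_or_u
-- ===== SOURCE A (Python) =====
-- from typing import List, Dict
--
-- def handle_direction_d_or_u(matrix:List[List[str]], series_list: List[str]):
--     """
--         Scans a matrix down, and adds a series of letters for every column
--         :param matrix - a 2D list to scan
--         :param series_list - a list to add the new strings
--         :return updated series_list
--     """
--     st: str = ""
--     for col in range(len(matrix[0])):
--         for row in range(len(matrix)):
--             st += matrix[row][col]
--         series_list.append(st)
--         st = ""
--     return series_list
-- ===== SOURCE B (Python) =====
-- def handle_direction_d_or_u(matrix, series_list):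
--     # Row-major single pass: keep one partial string per column and grow
--     # them all while scanning each row once; A instead rescans the whole
--     # matrix once per column.
--     partials = ["" for _ in matrix[0]]
--     for row in matrix:
--         partials = [p + ch for p, ch in zip(partials, row)]
--     series_list.extend(partials)
--     return series_list
-- ===== Notes on version B (the rewrite author's own statement) =====
-- stated objective: alternative
-- what changed: Replaces A's column-major rescans (one full matrix pass per column, building each column string separately) by a single row-major pass that maintains one partial string per column and grows all of them simultaneously, then extends series_list once.
import Mathlib
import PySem

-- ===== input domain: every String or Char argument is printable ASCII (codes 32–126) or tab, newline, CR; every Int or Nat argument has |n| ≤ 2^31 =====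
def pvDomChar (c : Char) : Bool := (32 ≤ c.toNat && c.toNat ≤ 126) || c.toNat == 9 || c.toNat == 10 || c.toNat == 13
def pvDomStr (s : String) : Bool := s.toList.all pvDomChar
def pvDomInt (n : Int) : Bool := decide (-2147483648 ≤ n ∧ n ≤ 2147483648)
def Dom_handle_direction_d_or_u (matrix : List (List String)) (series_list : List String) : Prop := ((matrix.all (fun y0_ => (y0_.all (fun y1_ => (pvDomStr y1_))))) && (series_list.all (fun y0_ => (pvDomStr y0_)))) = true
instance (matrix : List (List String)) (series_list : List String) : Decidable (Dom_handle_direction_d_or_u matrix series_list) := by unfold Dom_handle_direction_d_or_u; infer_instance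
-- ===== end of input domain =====

-- B replaces A's column-major rescans (one full matrix pass per column) by a single row-major
-- pass that maintains one partial string per column and grows them all at once (alternative
-- traversal, same asymptotic cost). Both Pythons append to series_list in place; the
-- equivalence proved here is about the return value.

-- ===== PORT A =====
def handle_direction_d_or_u (matrix : List (List String)) (series_list : List String) : List String :=
  (PySem.List.pyRange 0 (PySem.List.len (PySem.List.pyGetD matrix 0 [])) 1).foldl
    (fun acc col =>
      acc ++ [(PySem.List.pyRange 0 (PySem.List.len matrix) 1).foldl
        (fun st row => st ++ PySem.List.pyGetD (PySem.List.pyGetD matrix row []) col "") ""])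
    series_list

-- ===== PORT B =====
-- partials = ["" for _ in matrix[0]]; for row in matrix: partials = [p+ch for p,ch in zip(partials,row)];
-- series_list.extend(partials); return series_list
def handle_direction_d_or_u_alt (matrix : List (List String)) (series_list : List String) : List String :=
  let partials0 : List String := (PySem.List.pyGetD matrix 0 []).map (fun _ => "")
  let partials := matrix.foldl (fun ps row => ((ps.zip row).map (fun p => p.1 ++ p.2))) partials0
  series_list ++ partials

-- ===== PRECONDITION & SPEC =====
-- Pre_ is exactly where Python A returns: a nonempty matrix whose rows all have at least
-- len(matrix[0]) entries (otherwise A's indexing raises IndexError).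
def Pre_handle_direction_d_or_u (matrix : List (List String)) (series_list : List String) : Prop :=
  matrix ≠ [] ∧ ∀ r ∈ matrix, (matrix.headD []).length ≤ r.length
instance (matrix : List (List String)) (series_list : List String) : Decidable (Pre_handle_direction_d_or_u matrix series_list) := by unfold Pre_handle_direction_d_or_u; infer_instance
def pvWitness_handle_direction_d_or_u : List (List String) × List String := ([["a", "b"], ["c", "d"]], ["x"])

def Spec_handle_direction_d_or_u (matrix : List (List String)) (series_list : List String) (out : List String) : Prop := out = handle_direction_d_or_u_alt matrix series_list
instance (matrix : List (List String)) (series_list : List String) (out : List String) : Decidable (Spec_handle_direction_d_or_u matrix series_list out) := by unfold Spec_handle_direction_d_or_u; infer_instance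

-- ===== CLAIM =====
def Claim_equal_handle_direction_d_or_u : Prop := ∀ (matrix : List (List String)) (series_list : List String), Dom_handle_direction_d_or_u matrix series_list → Pre_handle_direction_d_or_u matrix series_list → Spec_handle_direction_d_or_u matrix series_list (handle_direction_d_or_u matrix series_list)

-- ===== LEMMAS AND PROOFS =====

-- "".join(p :: ps) = p ++ "".join(ps)
lemma join_empty_cons (p : String) (ps : List String) :
    PySem.Str.join "" (p :: ps) = p ++ PySem.Str.join "" ps := by
  rw [← String.toList_inj]
  cases ps with
  | nil =>
    simp [PySem.Str.toList_join, PySem.Chars.join_singleton, PySem.Chars.join_nil,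
      String.toList_append]
  | cons q rest =>
    simp [PySem.Str.toList_join, PySem.Chars.join_cons_cons, String.toList_append]

lemma join_empty_nil : PySem.Str.join "" ([] : List String) = "" := by
  rw [← String.toList_inj]
  simp [PySem.Str.toList_join, PySem.Chars.join_nil]

lemma foldl_append_join (ps : List String) (acc : String) :
    ps.foldl (· ++ ·) acc = acc ++ PySem.Str.join "" ps := by
  induction ps generalizing acc with
  | nil =>
    rw [← String.toList_inj]
    simp [PySem.Str.toList_join, PySem.Chars.join_nil, String.toList_append]
  | cons p ps ih =>
    rw [List.foldl_cons, ih, join_empty_cons, ← String.toList_inj]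
    simp [String.toList_append, List.append_assoc]

-- one column string of A equals "".join of that column
lemma colA_eq (matrix : List (List String)) (j : Nat) :
    (PySem.List.pyRange 0 (PySem.List.len matrix) 1).foldl
      (fun st row => st ++ PySem.List.pyGetD (PySem.List.pyGetD matrix row []) (j : Int) "") ""
      = PySem.Str.join "" (matrix.map (fun r => r.getD j "")) := by
  rw [PySem.List.foldl_pyRange_zero_pyGetD matrix [] (fun st r => st ++ PySem.List.pyGetD r (j : Int) "") ""]
  have : matrix.foldl (fun st r => st ++ PySem.List.pyGetD r (j : Int) "") ""
      = (matrix.map (fun r => r.getD j "")).foldl (· ++ ·) "" := by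
    rw [List.foldl_map]
    simp [PySem.List.pyGetD_natCast]
  rw [this, foldl_append_join, ← String.toList_inj]
  simp

-- B's row-major fold, characterised column-wise: starting from any partials vector whose
-- length every remaining row matches or exceeds, the fold yields, in column j, the start
-- value extended by the join of column j of the remaining rows.
lemma foldB_eq (rows : List (List String)) : ∀ (ps : List String),
    (∀ r ∈ rows, ps.length ≤ r.length) →
    rows.foldl (fun a row => ((a.zip row).map (fun p => p.1 ++ p.2))) ps
      = (List.range ps.length).map
          (fun j => ps.getD j "" ++ PySem.Str.join "" (rows.map (fun r => r.getD j ""))) := by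
  induction rows with
  | nil =>
    intro ps _
    apply List.ext_getElem
    · simp
    · intro j hj hj'
      simp only [List.getElem_map, List.getElem_range, List.map_nil, join_empty_nil,
        String.append_empty, List.foldl_nil]
      rw [List.getD_eq_getElem ps "" (by simpa using hj)]
      rfl
  | cons r rows ih =>
    intro ps hall
    have hr : ps.length ≤ r.length := hall r (by simp)
    have hlen : ((ps.zip r).map (fun p => p.1 ++ p.2)).length = ps.length := by
      simp [List.length_zip]; omega
    rw [List.foldl_cons, ih _ (by intro t ht; rw [hlen]; exact hall t (by simp [ht]))]
    rw [hlen]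
    apply List.map_congr_left
    intro j hj
    rw [List.mem_range] at hj
    have hget : ((ps.zip r).map (fun p => p.1 ++ p.2)).getD j ""
        = ps.getD j "" ++ r.getD j "" := by
      rw [List.getD_eq_getElem _ "" (by omega)]
      simp only [List.getElem_map, List.getElem_zip]
      rw [List.getD_eq_getElem ps "" (by omega), List.getD_eq_getElem r "" (by omega)]
    rw [hget, List.map_cons, join_empty_cons, ← String.toList_inj]
    simp [String.toList_append]

-- ===== VERDICT =====
theorem handle_direction_d_or_u_spec : Claim_equal_handle_direction_d_or_u := by
  intro matrix series_list _ hpre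
  obtain ⟨hne, hall⟩ := hpre
  unfold Spec_handle_direction_d_or_u handle_direction_d_or_u handle_direction_d_or_u_alt
  have h0 : PySem.List.pyGetD matrix 0 [] = matrix.headD [] := by
    cases matrix with
    | nil => exact absurd rfl hne
    | cons r rs => simp [PySem.List.pyGetD]
  rw [h0, show PySem.List.len (matrix.headD []) = ((matrix.headD []).length : Int) from
    PySem.List.len_eq _, PySem.List.pyRange_zero_natCast,
    PySem.List.foldl_append_singleton_eq_map, List.map_map]
  simp only
  rw [foldB_eq matrix ((matrix.headD []).map (fun _ => ""))
    (by intro t ht; simpa using hall t ht)]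
  rw [List.length_map]
  apply congrArg
  apply List.map_congr_left
  intro j hj
  rw [List.mem_range] at hj
  have hps : ((matrix.headD []).map (fun _ => "")).getD j "" = "" := by
    rw [List.getD_eq_getElem _ "" (by simpa using hj)]
    simp
  rw [Function.comp, colA_eq, hps, ← String.toList_inj]
  simp
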